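-- pv_equiv track=rewrite | github.com/drcpu-github/pooltogether-v4-brownie | utils/analyze_winners.py | process_draws
-- ===== SOURCE A (Python) =====
-- def process_draws(draws):
--     draws_dict = {}
--     last_draw_id = 0
--     for draw_id, network, block_number in draws:
--         if network not in draws_dict:
--             draws_dict[network] = {}
--         draws_dict[network][draw_id] = block_number
--         last_draw_id = max(last_draw_id, draw_id)
--     return {network: (draws_dict[network][last_draw_id - 1], draws_dict[network][last_draw_id]) for network in draws_dict.keys()}
-- ===== SOURCE B (Python) =====
-- def process_draws(draws):
--     draws = list(draws)
--     last_draw_id = 0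
--     for draw_id, _, _ in draws:
--         if draw_id > last_draw_id:
--             last_draw_id = draw_id
--     prev = {}
--     cur = {}
--     seen = {}
--     for draw_id, network, block_number in draws:
--         seen[network] = True
--         if draw_id == last_draw_id:
--             cur[network] = block_number
--         elif draw_id == last_draw_id - 1:
--             prev[network] = block_number
--     return {network: (prev[network], cur[network]) for network in seen}
-- ===== Notes on version B (the rewrite author's own statement) =====
-- stated objective: alternative
-- what changed: Instead of grouping every draw into a nested per-network dict of all draw ids, B first computes the last draw id in one pass and then keeps only the two relevant block numbers per network (prev/cur dicts) in a second pass, so no nested dict of all draws is ever built.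
import Mathlib
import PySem

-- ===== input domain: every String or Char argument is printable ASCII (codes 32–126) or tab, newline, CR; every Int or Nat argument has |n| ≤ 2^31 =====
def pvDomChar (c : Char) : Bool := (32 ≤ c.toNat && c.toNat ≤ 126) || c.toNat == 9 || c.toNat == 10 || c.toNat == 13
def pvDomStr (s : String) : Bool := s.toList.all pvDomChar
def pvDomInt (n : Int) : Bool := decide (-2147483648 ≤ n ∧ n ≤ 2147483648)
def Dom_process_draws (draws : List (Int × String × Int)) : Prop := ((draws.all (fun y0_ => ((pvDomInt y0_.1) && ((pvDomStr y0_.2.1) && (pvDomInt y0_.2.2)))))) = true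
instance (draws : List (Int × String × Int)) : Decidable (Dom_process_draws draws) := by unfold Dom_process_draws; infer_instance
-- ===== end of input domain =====

-- B computes the last draw id in a first pass and then keeps only the two relevant
-- block numbers per network (prev/cur dicts), instead of A's nested dict of all draws.


-- ===== PORT A =====
-- one loop step of A: ensure draws_dict[network] exists, then draws_dict[network][draw_id] = block_number;
-- last_draw_id = max(last_draw_id, draw_id)
def pdStepA (st : PySem.Dict String (PySem.Dict Int Int) × Int) (t : Int × String × Int) :
    PySem.Dict String (PySem.Dict Int Int) × Int :=
  let dd := if st.1.contains t.2.1 then st.1 else st.1.insert t.2.1 PySem.Dict.empty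
  (dd.insert t.2.1 ((dd.getD t.2.1 PySem.Dict.empty).insert t.1 t.2.2), max st.2 t.1)

def process_draws (draws : List (Int × String × Int)) : List (String × Int × Int) :=
  let st := draws.foldl pdStepA (PySem.Dict.empty, 0)
  -- the final dict comprehension; Python raises KeyError where a lookup is missing
  -- (those inputs are excluded by Pre_process_draws), the port reads a default 0 there
  st.1.keys.map (fun n =>
    (n, (st.1.getD n PySem.Dict.empty).getD (st.2 - 1) 0,
        (st.1.getD n PySem.Dict.empty).getD st.2 0))

-- ===== PORT B =====
-- second-pass loop step of B, with the precomputed last draw id L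
def pdStepB (L : Int) (st : PySem.Dict String Int × PySem.Dict String Int × PySem.Dict String Bool)
    (t : Int × String × Int) :
    PySem.Dict String Int × PySem.Dict String Int × PySem.Dict String Bool :=
  let seen := st.2.2.insert t.2.1 true
  if t.1 = L then (st.1, st.2.1.insert t.2.1 t.2.2, seen)
  else if t.1 = L - 1 then (st.1.insert t.2.1 t.2.2, st.2.1, seen)
  else (st.1, st.2.1, seen)

def process_draws_alt (draws : List (Int × String × Int)) : List (String × Int × Int) :=
  let L := draws.foldl (fun m t => if t.1 > m then t.1 else m) 0
  let st := draws.foldl (pdStepB L) (PySem.Dict.empty, PySem.Dict.empty, PySem.Dict.empty)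
  st.2.2.keys.map (fun n => (n, st.1.getD n 0, st.2.1.getD n 0))

-- ===== PRECONDITION & SPEC =====
-- Pre_ excludes exactly the inputs on which Python A raises KeyError in the final
-- comprehension: some network lacks a draw with id last_draw_id or last_draw_id - 1.
def Pre_process_draws (draws : List (Int × String × Int)) : Prop :=
  ∀ t ∈ draws,
    (∃ u ∈ draws, u.2.1 = t.2.1 ∧ u.1 = draws.foldl (fun m v => max m v.1) 0) ∧
    (∃ u ∈ draws, u.2.1 = t.2.1 ∧ u.1 = draws.foldl (fun m v => max m v.1) 0 - 1)
instance (draws : List (Int × String × Int)) : Decidable (Pre_process_draws draws) := by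
  unfold Pre_process_draws; infer_instance

def pvWitness_process_draws : (List (Int × String × Int)) :=
  [(1, "eth", 10), (2, "eth", 20), (1, "poly", 5), (2, "poly", 6)]

def Spec_process_draws (draws : List (Int × String × Int)) (out : List (String × Int × Int)) : Prop := out = process_draws_alt draws
instance (draws : List (Int × String × Int)) (out : List (String × Int × Int)) : Decidable (Spec_process_draws draws out) := by unfold Spec_process_draws; infer_instance

-- ===== CLAIM (what is proved, stated in full; the proofs are below) =====
def Claim_equal_process_draws : Prop := ∀ (draws : List (Int × String × Int)), Dom_process_draws draws → Pre_process_draws draws → Spec_process_draws draws (process_draws draws)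

-- ===== LEMMAS AND PROOFS =====

-- A's fold over a pair splits into a dict fold and a max fold
lemma pdFoldA_split (draws : List (Int × String × Int))
    (dd : PySem.Dict String (PySem.Dict Int Int)) (l : Int) :
    draws.foldl pdStepA (dd, l) =
      (draws.foldl (fun d t =>
          let d' := if d.contains t.2.1 then d else d.insert t.2.1 PySem.Dict.empty
          d'.insert t.2.1 ((d'.getD t.2.1 PySem.Dict.empty).insert t.1 t.2.2)) dd,
       draws.foldl (fun m t => max m t.1) l) := by
  induction draws generalizing dd l with
  | nil => rfl
  | cons t rest ih => simp [List.foldl, pdStepA, ih]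

-- B's first pass computes the same running maximum as A's last_draw_id
lemma pdLast_eq (draws : List (Int × String × Int)) (l : Int) :
    draws.foldl (fun m t => if t.1 > m then t.1 else m) l =
      draws.foldl (fun m t => max m t.1) l := by
  induction draws generalizing l with
  | nil => rfl
  | cons t rest ih =>
    simp only [List.foldl]
    rw [ih]
    congr 1
    by_cases h : t.1 > l
    · rw [if_pos h, max_eq_right (le_of_lt h)]
    · rw [if_neg h, max_eq_left (not_lt.mp h)]

-- the loop invariant: B's (prev, cur, seen) tracks A's nested dict at keys L-1 and L
lemma pdInvariant (L : Int) (draws : List (Int × String × Int))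
    (dd : PySem.Dict String (PySem.Dict Int Int))
    (prev cur : PySem.Dict String Int) (seen : PySem.Dict String Bool)
    (hk : dd.keys = seen.keys)
    (hp : ∀ n, (dd.getD n PySem.Dict.empty).get? (L - 1) = prev.get? n)
    (hc : ∀ n, (dd.getD n PySem.Dict.empty).get? L = cur.get? n) :
    (draws.foldl (fun d t =>
        let d' := if d.contains t.2.1 then d else d.insert t.2.1 PySem.Dict.empty
        d'.insert t.2.1 ((d'.getD t.2.1 PySem.Dict.empty).insert t.1 t.2.2)) dd).keys =
      (draws.foldl (pdStepB L) (prev, cur, seen)).2.2.keys ∧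
    (∀ n, ((draws.foldl (fun d t =>
        let d' := if d.contains t.2.1 then d else d.insert t.2.1 PySem.Dict.empty
        d'.insert t.2.1 ((d'.getD t.2.1 PySem.Dict.empty).insert t.1 t.2.2)) dd).getD n
          PySem.Dict.empty).get? (L - 1) =
      (draws.foldl (pdStepB L) (prev, cur, seen)).1.get? n) ∧
    (∀ n, ((draws.foldl (fun d t =>
        let d' := if d.contains t.2.1 then d else d.insert t.2.1 PySem.Dict.empty
        d'.insert t.2.1 ((d'.getD t.2.1 PySem.Dict.empty).insert t.1 t.2.2)) dd).getD n
          PySem.Dict.empty).get? L =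
      (draws.foldl (pdStepB L) (prev, cur, seen)).2.1.get? n) := by
  induction draws generalizing dd prev cur seen with
  | nil => exact ⟨hk, hp, hc⟩
  | cons t rest ih =>
    obtain ⟨d, n₀, b⟩ := t
    simp only [List.foldl, pdStepB]
    have hdd1 : (if dd.contains n₀ then dd else dd.insert n₀ PySem.Dict.empty).getD n₀
        PySem.Dict.empty = dd.getD n₀ PySem.Dict.empty := by
      by_cases h : dd.contains n₀
      · simp [h]
      · simp [h, PySem.Dict.getD_insert_self, PySem.Dict.getD_of_not_contains]
    rw [hdd1]
    have hkeys : ((if dd.contains n₀ then dd else dd.insert n₀ PySem.Dict.empty).insert n₀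
        ((dd.getD n₀ PySem.Dict.empty).insert d b)).keys = (seen.insert n₀ true).keys := by
      by_cases h : dd.contains n₀
      · have hs : seen.contains n₀ = true := by
          rw [PySem.Dict.contains_eq_decide_mem_keys] at h ⊢; rw [← hk]; exact h
        simp [h, PySem.Dict.keys_insert_of_contains, hs, hk]
      · have h' : dd.contains n₀ = false := by simpa using h
        have hs : seen.contains n₀ = false := by
          rw [PySem.Dict.contains_eq_decide_mem_keys] at h' ⊢; rw [← hk]; exact h'
        simp [h', PySem.Dict.keys_insert_of_contains, PySem.Dict.contains_insert_self,
          PySem.Dict.keys_insert_of_not_contains, hs, hk]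
    have hgetD : ∀ n, ((if dd.contains n₀ then dd else dd.insert n₀ PySem.Dict.empty).insert n₀
        ((dd.getD n₀ PySem.Dict.empty).insert d b)).getD n PySem.Dict.empty =
        if n = n₀ then (dd.getD n₀ PySem.Dict.empty).insert d b else dd.getD n PySem.Dict.empty := by
      intro n
      rw [PySem.Dict.getD_insert]
      by_cases hn : n = n₀
      · simp [hn]
      · rw [if_neg hn, if_neg hn]
        by_cases h : dd.contains n₀
        · rw [if_pos h]
        · rw [if_neg h, PySem.Dict.getD_insert, if_neg hn]
    by_cases hdL : d = L
    · rw [if_pos hdL]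
      refine ih _ prev (cur.insert n₀ b) (seen.insert n₀ true) hkeys ?_ ?_
      · intro n
        rw [hgetD n]
        by_cases hn : n = n₀
        · rw [if_pos hn, PySem.Dict.get?_insert, if_neg (by omega), hn]; exact hp n₀
        · rw [if_neg hn]; exact hp n
      · intro n
        rw [hgetD n]
        by_cases hn : n = n₀
        · rw [if_pos hn, PySem.Dict.get?_insert, if_pos (by omega), hn,
              PySem.Dict.get?_insert, if_pos rfl]
        · rw [if_neg hn, PySem.Dict.get?_insert, if_neg hn]; exact hc n
    · rw [if_neg hdL]
      by_cases hdL1 : d = L - 1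
      · rw [if_pos hdL1]
        refine ih _ (prev.insert n₀ b) cur (seen.insert n₀ true) hkeys ?_ ?_
        · intro n
          rw [hgetD n]
          by_cases hn : n = n₀
          · rw [if_pos hn, PySem.Dict.get?_insert, if_pos (by omega), hn,
                PySem.Dict.get?_insert, if_pos rfl]
          · rw [if_neg hn, PySem.Dict.get?_insert, if_neg hn]; exact hp n
        · intro n
          rw [hgetD n]
          by_cases hn : n = n₀
          · rw [if_pos hn, PySem.Dict.get?_insert, if_neg (by omega), hn]; exact hc n₀
          · rw [if_neg hn]; exact hc n
      · rw [if_neg hdL1]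
        refine ih _ prev cur (seen.insert n₀ true) hkeys ?_ ?_
        · intro n
          rw [hgetD n]
          by_cases hn : n = n₀
          · rw [if_pos hn, PySem.Dict.get?_insert, if_neg (by omega), hn]; exact hp n₀
          · rw [if_neg hn]; exact hp n
        · intro n
          rw [hgetD n]
          by_cases hn : n = n₀
          · rw [if_pos hn, PySem.Dict.get?_insert, if_neg (by omega), hn]; exact hc n₀
          · rw [if_neg hn]; exact hc n

theorem pd_equiv (draws : List (Int × String × Int)) :
    process_draws draws = process_draws_alt draws := by
  simp only [process_draws, process_draws_alt]
  rw [pdLast_eq, pdFoldA_split]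
  obtain ⟨hk, hp, hc⟩ := pdInvariant (draws.foldl (fun m t => max m t.1) 0) draws
    PySem.Dict.empty PySem.Dict.empty PySem.Dict.empty PySem.Dict.empty
    (by simp) (fun n => by simp) (fun n => by simp)
  simp only
  rw [hk]
  refine List.map_congr_left (fun n hn => ?_)
  have hp' := hp n
  have hc' := hc n
  simp only [PySem.Dict.getD_eq_get?_getD] at hp' hc' ⊢
  rw [hp', hc']

-- ===== VERDICT (by name: the statement is the Claim_ definition above) =====
theorem process_draws_spec : Claim_equal_process_draws := by
  intro draws _ _
  exact pd_equiv draws
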